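-- pv_equiv track=rewrite | github.com/KLRussell/Python-Access_Upload | Main.py | validate_cols
-- ===== SOURCE A (Python) =====
-- def validate_cols(cols, true_cols):
--     if cols:
--         for col in cols:
--             found = False
--
--             for true_col in true_cols:
--                 if col.lower() == true_col.lower():
--                     found = True
--                     break
--
--             if not found:
--                 return False
--
--         return True
--     else:
--         return False
-- ===== SOURCE B (Python) =====
-- def validate_cols(cols, true_cols):
--     # Inverted traversal: collect the lowercased cols still unaccounted for,
--     # then walk true_cols once, discarding each as it is seen; valid iff the
--     # pending collection empties (and cols was non-empty).
--     pending = {c.lower() for c in cols}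
--     for t in true_cols:
--         pending.discard(t.lower())
--         if not pending:
--             break
--     return bool(cols) and not pending
-- ===== Notes on version B (the rewrite author's own statement) =====
-- stated objective: alternative
-- what changed: B inverts the traversal: instead of scanning true_cols for each col with a found flag and early returns, it collects the lowercased cols into a pending set and walks true_cols once, discarding each matched entry and stopping when the set empties; valid iff cols was non-empty and the set emptied.
import Mathlib
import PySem

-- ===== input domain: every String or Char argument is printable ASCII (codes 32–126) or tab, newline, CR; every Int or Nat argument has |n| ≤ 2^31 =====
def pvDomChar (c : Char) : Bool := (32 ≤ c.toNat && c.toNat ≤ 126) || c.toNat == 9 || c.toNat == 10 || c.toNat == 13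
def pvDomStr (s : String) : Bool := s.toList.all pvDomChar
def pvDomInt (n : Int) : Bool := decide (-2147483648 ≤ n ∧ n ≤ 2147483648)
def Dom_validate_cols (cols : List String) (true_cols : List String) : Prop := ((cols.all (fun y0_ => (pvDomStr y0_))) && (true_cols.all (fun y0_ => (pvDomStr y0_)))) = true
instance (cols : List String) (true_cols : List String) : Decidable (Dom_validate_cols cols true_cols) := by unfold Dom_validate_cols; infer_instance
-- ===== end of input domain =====

-- B inverts the traversal: a pending set of lowercased cols is emptied by one walk over true_cols with early exit (alternative decomposition; same behaviour).
-- ===== PORT A =====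
-- inner 'for true_col in true_cols: if col.lower() == true_col.lower(): found = True; break'
def vcFound (col : String) (true_cols : List String) : Bool :=
  match true_cols with
  | [] => false
  | t :: ts => if PySem.Str.lower col == PySem.Str.lower t then true else vcFound col ts

-- outer 'for col in cols: ... if not found: return False' then 'return True'
def vcLoop (cols : List String) (true_cols : List String) : Bool :=
  match cols with
  | [] => true
  | c :: cs => if !(vcFound c true_cols) then false else vcLoop cs true_cols

def validate_cols (cols : List String) (true_cols : List String) : Bool :=
  match cols with
  | [] => false                    -- 'if cols: ... else: return False'
  | _ => vcLoop cols true_cols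

-- ===== PORT B =====
-- 'for t in true_cols: pending.discard(t.lower()); if not pending: break'
def vcDiscardLoop (true_cols : List String) (pending : PySem.Set String) : PySem.Set String :=
  match true_cols with
  | [] => pending
  | t :: ts =>
    let p := PySem.Set.discard pending (PySem.Str.lower t)
    if p.isEmpty then p else vcDiscardLoop ts p

def validate_cols_alt (cols : List String) (true_cols : List String) : Bool :=
  let pending := PySem.Set.ofList (cols.map PySem.Str.lower)
  !cols.isEmpty && (vcDiscardLoop true_cols pending).isEmpty

-- ===== PRECONDITION & SPEC =====
def Spec_validate_cols (cols : List String) (true_cols : List String) (out : Bool) : Prop := out = validate_cols_alt cols true_cols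
instance (cols : List String) (true_cols : List String) (out : Bool) : Decidable (Spec_validate_cols cols true_cols out) := by unfold Spec_validate_cols; infer_instance

-- ===== CLAIM (what is proved, stated in full; the proofs are below) =====
def Claim_equal_validate_cols : Prop := ∀ (cols : List String) (true_cols : List String), Dom_validate_cols cols true_cols → Spec_validate_cols cols true_cols (validate_cols cols true_cols)

-- ===== LEMMAS AND PROOFS =====

theorem vcFound_iff (c : String) (ts : List String) :
    vcFound c ts = true ↔ PySem.Str.lower c ∈ ts.map PySem.Str.lower := by
  induction ts with
  | nil => simp [vcFound]
  | cons t ts ih => by_cases h : PySem.Str.lower c = PySem.Str.lower t <;> simp [vcFound, h, ih]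

theorem vcLoop_iff (cols ts : List String) :
    vcLoop cols ts = true ↔ ∀ c ∈ cols, PySem.Str.lower c ∈ ts.map PySem.Str.lower := by
  induction cols with
  | nil => simp [vcLoop]
  | cons c cs ih =>
    show (if !(vcFound c ts) then false else vcLoop cs ts) = true ↔ _
    by_cases h : vcFound c ts = true
    · rw [h]
      simp only [Bool.not_true, Bool.false_eq_true, if_false, ih, List.forall_mem_cons]
      exact ⟨fun hcs => ⟨(vcFound_iff c ts).mp h, hcs⟩, fun hp => hp.2⟩
    · have h' : vcFound c ts = false := by simpa using h
      rw [h']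
      simp only [Bool.not_false, if_true, Bool.false_eq_true, false_iff]
      intro hall
      exact h ((vcFound_iff c ts).mpr (hall c (List.mem_cons_self)))

-- the discard loop empties the pending set iff every pending element occurs among the lowered true_cols
theorem vcDiscardLoop_empty_iff (ts : List String) (p : PySem.Set String) :
    vcDiscardLoop ts p = [] ↔ ∀ x ∈ p, x ∈ ts.map PySem.Str.lower := by
  induction ts generalizing p with
  | nil =>
    simp only [vcDiscardLoop, List.map_nil, List.not_mem_nil]
    exact ⟨fun h => by subst h; simp, fun h => List.eq_nil_iff_forall_not_mem.mpr h⟩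
  | cons t ts ih =>
    show (if (PySem.Set.discard p (PySem.Str.lower t)).isEmpty then _ else vcDiscardLoop ts _) = [] ↔ _
    by_cases he : PySem.Set.discard p (PySem.Str.lower t) = []
    · simp only [he, List.isEmpty_nil, if_true, List.map_cons, true_iff]
      intro x hx
      by_cases hxt : x = PySem.Str.lower t
      · exact hxt ▸ List.mem_cons_self
      · exact absurd ((PySem.Set.mem_discard _ _ _).mpr ⟨hx, hxt⟩) (by simp [he])
    · rw [if_neg (by simpa [List.isEmpty_iff] using he), ih]
      constructor
      · intro h x hx
        by_cases hxt : x = PySem.Str.lower t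
        · simp [hxt]
        · have := h x ((PySem.Set.mem_discard _ _ _).mpr ⟨hx, hxt⟩)
          simp only [List.map_cons, List.mem_cons]
          exact Or.inr this
      · intro h x hx
        obtain ⟨hxp, hxt⟩ := (PySem.Set.mem_discard _ _ _).mp hx
        have := h x hxp
        simp only [List.map_cons, List.mem_cons] at this
        exact this.resolve_left hxt

-- ===== VERDICT =====
theorem validate_cols_spec : Claim_equal_validate_cols := by
  intro cols ts _
  unfold Spec_validate_cols validate_cols validate_cols_alt
  match cols with
  | [] => simp
  | c :: cs =>
    simp only [List.isEmpty_cons, Bool.not_false, Bool.true_and]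
    rw [Bool.eq_iff_iff, vcLoop_iff, List.isEmpty_iff, vcDiscardLoop_empty_iff]
    constructor
    · intro h x hx
      obtain ⟨c', hc', rfl⟩ := List.mem_map.mp ((PySem.Set.mem_ofList _ _).mp hx)
      exact h c' hc'
    · intro h c' hc'
      exact h _ ((PySem.Set.mem_ofList _ _).mpr (List.mem_map_of_mem hc'))
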